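-- pv_equiv track=rewrite | github.com/nstephenh/NCSSM-CS402-PS2.py | ps2.py | ratecloseness
-- ===== SOURCE A (Python) =====
-- def ratecloseness(str1, str2):
-- 	"""Precon: str1 and str2 are strings
-- postcon: returns the number of characters in str2 that are in str1, unless they are the same string, then return -1
-- """
-- 	closeness= 0
-- 	if str1 == str2:
-- 		return -1
-- 	for char in str1:
-- 		i = str2.find(char)
-- 		if i >=0:
-- 			str2 = str2[:i] + str2[i+1:]
-- 			closeness += 1
-- 	return closeness
-- ===== SOURCE B (Python) =====
-- def ratecloseness(str1, str2):
--     """Same contract as A: number of characters of str2 matchable one-to-one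
--     with characters of str1 (multiset intersection size), -1 if the strings are equal.
--     B builds a count table from str1 once and makes a single pass over str2."""
--     if str1 == str2:
--         return -1
--     counts = {}
--     for c in str1:
--         counts[c] = counts.get(c, 0) + 1
--     closeness = 0
--     for c in str2:
--         if counts.get(c, 0) > 0:
--             counts[c] = counts.get(c, 0) - 1
--             closeness += 1
--     return closeness
-- ===== Notes on version B (the rewrite author's own statement) =====
-- stated objective: faster
-- what changed: Instead of scanning str1 and repeatedly searching/splicing str2 (find + slice-concatenation per matched char), B builds a character-count table from str1 once and makes a single pass over str2, decrementing counts.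
import Mathlib
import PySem

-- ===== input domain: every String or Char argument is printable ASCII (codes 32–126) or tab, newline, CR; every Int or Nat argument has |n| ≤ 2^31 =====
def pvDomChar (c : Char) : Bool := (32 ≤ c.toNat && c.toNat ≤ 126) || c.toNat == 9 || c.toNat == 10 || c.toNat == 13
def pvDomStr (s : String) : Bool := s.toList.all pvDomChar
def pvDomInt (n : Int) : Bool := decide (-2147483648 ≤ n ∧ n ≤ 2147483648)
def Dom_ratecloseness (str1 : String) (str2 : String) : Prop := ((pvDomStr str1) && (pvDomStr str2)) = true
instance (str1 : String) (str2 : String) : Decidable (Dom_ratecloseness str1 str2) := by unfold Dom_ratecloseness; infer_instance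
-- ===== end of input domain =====

-- B replaces A's repeated find-and-splice of str2 with a one-pass character-count table built from str1 (objective: faster — one pass with a count table instead of a quadratic search-and-splice).


-- ===== PORT A =====
-- the 'for char in str1' loop; state is (remaining chars of str1, current str2, closeness)
def rateLoopA : List Char → List Char → Int → Int
  | [], _, acc => acc
  | c :: rest, s2, acc =>
    let i : Int := PySem.Chars.find s2 [c]      -- str2.find(char)
    if 0 ≤ i then
      rateLoopA rest
        (PySem.Chars.slice s2 none (some i) ++ PySem.Chars.slice s2 (some (i + 1)) none)  -- str2[:i] + str2[i+1:]
        (acc + 1)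
    else rateLoopA rest s2 acc

def ratecloseness (str1 : String) (str2 : String) : Int :=
  if str1 == str2 then -1
  else rateLoopA str1.toList str2.toList 0

-- ===== PORT B =====
-- the 'for c in str2' loop over the count table; counts.get(c, 0) is Dict.getD
def rateLoopB : List Char → PySem.Dict Char Int → Int → Int
  | [], _, acc => acc
  | c :: rest, d, acc =>
    if 0 < d.getD c 0 then
      rateLoopB rest (d.insert c (d.getD c 0 - 1)) (acc + 1)
    else rateLoopB rest d acc

def ratecloseness_alt (str1 : String) (str2 : String) : Int :=
  if str1 == str2 then -1
  else
    -- counts[c] = counts.get(c, 0) + 1  over str1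
    let counts := str1.toList.foldl (fun d c => d.insert c (d.getD c 0 + 1)) PySem.Dict.empty
    rateLoopB str2.toList counts 0

-- ===== PRECONDITION & SPEC =====
def Spec_ratecloseness (str1 : String) (str2 : String) (out : Int) : Prop := out = ratecloseness_alt str1 str2
instance (str1 : String) (str2 : String) (out : Int) : Decidable (Spec_ratecloseness str1 str2 out) := by unfold Spec_ratecloseness; infer_instance

-- ===== CLAIM (what is proved, stated in full; the proofs are below) =====
def Claim_equal_ratecloseness : Prop := ∀ (str1 : String) (str2 : String), Dom_ratecloseness str1 str2 → Spec_ratecloseness str1 str2 (ratecloseness str1 str2)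

-- ===== LEMMAS AND PROOFS =====

-- removing the FIRST occurrence of c by splicing at find's index is List.erase
lemma take_find_append_drop (s2 : List Char) (c : Char)
    (h : 0 ≤ PySem.Chars.find s2 [c]) :
    s2.take (PySem.Chars.find s2 [c]).toNat ++ s2.drop ((PySem.Chars.find s2 [c]).toNat + 1)
      = s2.erase c := by
  obtain ⟨hpre, hmin⟩ := PySem.Chars.find_spec h
  set i := (PySem.Chars.find s2 [c]).toNat with hi
  obtain ⟨t, ht⟩ := hpre
  have hnotmem : c ∉ s2.take i := by
    intro hmem
    obtain ⟨j, hj, hjc⟩ := List.getElem_of_mem hmem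
    have hjlen : j < s2.length := by
      have := hj; simp [List.length_take] at this; omega
    have hjlt : j < i := by
      have := hj; simp [List.length_take] at this; omega
    apply hmin j hjlt
    have : s2.drop j = s2[j] :: s2.drop (j + 1) := List.drop_eq_getElem_cons hjlen
    rw [this]
    have : s2[j] = c := by
      have := List.getElem_take (xs := s2) (i := j) (h := hj)
      rw [← this]; exact hjc
    rw [this]
    exact ⟨_, rfl⟩
  have hsplit : s2 = s2.take i ++ (c :: t) := by
    conv_lhs => rw [← List.take_append_drop i s2]
    rw [← ht]; simp
  have hdrop : s2.drop (i + 1) = t := by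
    rw [List.drop_add_one_eq_tail_drop, ← ht]; rfl
  rw [hdrop]
  conv_rhs => rw [hsplit]
  rw [List.erase_append_right _ hnotmem, List.erase_cons_head]

-- A's loop counts the multiset intersection of the two character lists
lemma rateLoopA_eq (s1 : List Char) : ∀ (s2 : List Char) (acc : Int),
    rateLoopA s1 s2 acc = acc + (((s1 : Multiset Char)) ∩ (s2 : Multiset Char)).card := by
  induction s1 with
  | nil => intro s2 acc; simp [rateLoopA]
  | cons c rest ih =>
    intro s2 acc
    by_cases hmem : c ∈ s2
    · have hfind : 0 ≤ PySem.Chars.find s2 [c] := by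
        rw [PySem.Chars.find_nonneg_iff, List.singleton_infix_iff]; exact hmem
      simp only [rateLoopA, hfind, if_pos]
      rw [PySem.Chars.slice_eq_listSlice, PySem.Chars.slice_eq_listSlice,
          PySem.List.slice_to _ hfind, PySem.List.slice_from _ (by omega)]
      have htn : (PySem.Chars.find s2 [c] + 1).toNat = (PySem.Chars.find s2 [c]).toNat + 1 := by omega
      rw [htn, take_find_append_drop s2 c hfind, ih]
      have : ((↑(c :: rest) : Multiset Char) ∩ ↑s2) = c ::ₘ ((↑rest : Multiset Char) ∩ (↑s2 : Multiset Char).erase c) := by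
        rw [show ((↑(c :: rest) : Multiset Char)) = c ::ₘ (↑rest : Multiset Char) from rfl]
        exact Multiset.cons_inter_of_pos _ (by simpa using hmem)
      rw [this, ← Multiset.coe_erase]
      simp; omega
    · have hfind : ¬ 0 ≤ PySem.Chars.find s2 [c] := by
        rw [PySem.Chars.find_nonneg_iff, List.singleton_infix_iff]; exact hmem
      simp only [rateLoopA, hfind, if_neg, not_false_iff]
      rw [ih]
      have : ((↑(c :: rest) : Multiset Char) ∩ ↑s2) = (↑rest : Multiset Char) ∩ ↑s2 := by
        rw [show ((↑(c :: rest) : Multiset Char)) = c ::ₘ (↑rest : Multiset Char) from rfl]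
        exact Multiset.cons_inter_of_neg _ (by simpa using hmem)
      rw [this]

-- B's loop over str2, with a dict whose counts agree with a multiset m, also counts the intersection
lemma rateLoopB_eq (s2 : List Char) : ∀ (d : PySem.Dict Char Int) (m : Multiset Char)
    (hd : ∀ c, d.getD c 0 = (m.count c : Int)) (acc : Int),
    rateLoopB s2 d acc = acc + ((s2 : Multiset Char) ∩ m).card := by
  induction s2 with
  | nil => intro d m hd acc; simp [rateLoopB]
  | cons c rest ih =>
    intro d m hd acc
    by_cases hmem : c ∈ m
    · have hpos : 0 < d.getD c 0 := by
        rw [hd c]; exact_mod_cast Multiset.count_pos.mpr hmem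
      simp only [rateLoopB, hpos, if_pos]
      rw [ih (d.insert c (d.getD c 0 - 1)) (m.erase c) ?_ (acc + 1)]
      · have : ((↑(c :: rest) : Multiset Char) ∩ m) = c ::ₘ ((↑rest : Multiset Char) ∩ m.erase c) := by
          rw [show ((↑(c :: rest) : Multiset Char)) = c ::ₘ (↑rest : Multiset Char) from rfl]
          exact Multiset.cons_inter_of_pos _ hmem
        rw [this]; simp; omega
      · intro c'
        rw [PySem.Dict.getD_insert]
        by_cases hc : c' = c
        · subst hc
          rw [if_pos rfl, hd c', Multiset.count_erase_self]
          have : 1 ≤ m.count c' := Multiset.count_pos.mpr hmem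
          omega
        · rw [if_neg hc, hd c', Multiset.count_erase_of_ne hc]
    · have hzero : ¬ 0 < d.getD c 0 := by
        rw [hd c]
        have : m.count c = 0 := Multiset.count_eq_zero.mpr hmem
        omega
      simp only [rateLoopB, hzero, if_neg, not_false_iff]
      rw [ih d m hd acc]
      have : ((↑(c :: rest) : Multiset Char) ∩ m) = (↑rest : Multiset Char) ∩ m := by
        rw [show ((↑(c :: rest) : Multiset Char)) = c ::ₘ (↑rest : Multiset Char) from rfl]
        exact Multiset.cons_inter_of_neg _ hmem
      rw [this]

-- the build loop of B produces exactly the character counts of str1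
lemma counts_spec (s1 : List Char) (c : Char) :
    (s1.foldl (fun d c => d.insert c (d.getD c 0 + 1)) PySem.Dict.empty).getD c 0
      = ((s1 : Multiset Char).count c : Int) := by
  rw [PySem.Dict.getD_foldl_insert_add_one, PySem.Dict.getD_empty, Multiset.coe_count]
  simp

-- ===== VERDICT (by name: the statement is the Claim_ definition above) =====
theorem ratecloseness_spec : Claim_equal_ratecloseness := by
  intro str1 str2 _hdom
  unfold Spec_ratecloseness ratecloseness ratecloseness_alt
  by_cases h : str1 == str2
  · simp [h]
  · simp only [h, if_neg, Bool.false_eq_true, not_false_iff]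
    rw [rateLoopA_eq, rateLoopB_eq _ _ (↑str1.toList) (counts_spec str1.toList) 0,
        Multiset.inter_comm]
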